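-- pv_equiv track=rewrite | github.com/jlbcontrols/pidbot-manager | ignition/script-python/pidbotscripts/pb_mgr/pidgroups/members/add_pid/code.py | getFinalDropBeforeTagPath
-- ===== SOURCE A (Python) =====
-- def getFinalDropBeforeTagPath(dropBeforeTagPath,newTagPaths,currentTagPaths):
-- 	if not dropBeforeTagPath in newTagPaths:
-- 		return dropBeforeTagPath
-- 	index = currentTagPaths.index(dropBeforeTagPath)
-- 	if dropBeforeTagPath in newTagPaths:
-- 		index = currentTagPaths.index(dropBeforeTagPath) + 1
-- 		if index < len(currentTagPaths):
-- 			dropBeforeTagPath = currentTagPaths[index]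
-- 			return getFinalDropBeforeTagPath(dropBeforeTagPath,newTagPaths,currentTagPaths)
-- 		else:
-- 			return ""
-- 	else:
-- 		return dropBeforeTagPath
-- ===== SOURCE B (Python) =====
-- def getFinalDropBeforeTagPath(dropBeforeTagPath, newTagPaths, currentTagPaths):
--     if dropBeforeTagPath not in newTagPaths:
--         return dropBeforeTagPath
--     newSet = set(newTagPaths)
--     start = currentTagPaths.index(dropBeforeTagPath) + 1
--     for path in currentTagPaths[start:]:
--         if path not in newSet:
--             return path
--     return ""
-- ===== Notes on version B (the rewrite author's own statement) =====
-- stated objective: alternative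
-- what changed: Replaces A's recursion with a repeated list.index/membership scan per step by one index lookup, a set for membership, and a single forward scan over the tail of currentTagPaths (O(n+m) worst case vs A's O(n*(n+m))).
-- outside the precondition, e.g. on getFinalDropBeforeTagPath('a', ['a', 'b'], ['b', 'c', 'a', 'b', 'd']): A returns 'c', B returns 'd'; on getFinalDropBeforeTagPath('a', ['a'], ['b']): A raises ValueError, B raises ValueError; on getFinalDropBeforeTagPath('a', ['a'], ['a', 'a']): A raises RecursionError, B returns ''
import Mathlib
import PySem

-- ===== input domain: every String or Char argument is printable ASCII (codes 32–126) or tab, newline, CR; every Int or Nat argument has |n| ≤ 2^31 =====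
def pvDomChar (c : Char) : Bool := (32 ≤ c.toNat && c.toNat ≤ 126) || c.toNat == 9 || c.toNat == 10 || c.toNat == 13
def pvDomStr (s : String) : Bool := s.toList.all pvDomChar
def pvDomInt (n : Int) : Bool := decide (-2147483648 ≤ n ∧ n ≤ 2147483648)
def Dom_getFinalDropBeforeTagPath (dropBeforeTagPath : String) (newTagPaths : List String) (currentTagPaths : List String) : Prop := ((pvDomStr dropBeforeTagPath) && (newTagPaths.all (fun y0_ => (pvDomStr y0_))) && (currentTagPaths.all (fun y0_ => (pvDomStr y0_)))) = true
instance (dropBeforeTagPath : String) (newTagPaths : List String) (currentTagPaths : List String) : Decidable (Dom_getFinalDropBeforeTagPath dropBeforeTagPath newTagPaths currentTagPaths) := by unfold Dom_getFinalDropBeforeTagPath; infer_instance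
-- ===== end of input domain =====

-- One-line summary: B replaces A's per-step membership/index rescans and recursion by one
-- index lookup, a set for membership, and a single forward scan over the tail.

-- ===== PORT A =====
-- A's recursion has no structural decrease (on duplicate lists it recurses forever, raising
-- RecursionError); the port carries fuel = currentTagPaths.length + 1, which Pre_ makes sufficient.
def goA (fuel : Nat) (dropBeforeTagPath : String) (newTagPaths : List String) (currentTagPaths : List String) : String :=
  match fuel with
  | 0 => ""        -- fuel exhaustion: unreachable under Pre_ (Python would raise RecursionError)
  | fuel + 1 =>
    if ¬ (dropBeforeTagPath ∈ newTagPaths) then dropBeforeTagPath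
    else
      match PySem.List.index? currentTagPaths dropBeforeTagPath with
      | none => ""   -- ValueError in Python; excluded by Pre_
      | some idx0 =>
        let _index := idx0      -- A computes the index, then recomputes it below
        if dropBeforeTagPath ∈ newTagPaths then
          let index := idx0 + 1
          if index < currentTagPaths.length then
            let dropBeforeTagPath' := (PySem.List.pyGet? currentTagPaths (index : Int)).getD ""
            goA fuel dropBeforeTagPath' newTagPaths currentTagPaths
          else ""
        else dropBeforeTagPath

def getFinalDropBeforeTagPath (dropBeforeTagPath : String) (newTagPaths : List String) (currentTagPaths : List String) : String :=
  goA (currentTagPaths.length + 1) dropBeforeTagPath newTagPaths currentTagPaths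

-- ===== PORT B =====
-- the for-loop of Source B: first element of the tail slice not in the set, else ""
def scanB (newSet : PySem.Set String) : List String → String
  | [] => ""
  | p :: rest => if ¬ (PySem.Set.contains newSet p) then p else scanB newSet rest

def getFinalDropBeforeTagPath_alt (dropBeforeTagPath : String) (newTagPaths : List String) (currentTagPaths : List String) : String :=
  if ¬ (dropBeforeTagPath ∈ newTagPaths) then dropBeforeTagPath
  else
    let newSet := PySem.Set.ofList newTagPaths
    match PySem.List.index? currentTagPaths dropBeforeTagPath with
    | none => ""   -- ValueError in Python; excluded by Pre_
    | some i =>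
      scanB newSet (PySem.List.slice currentTagPaths (some ((i : Int) + 1)) none)

-- ===== PRECONDITION & SPEC =====
-- Pre_ excludes inputs where dropBeforeTagPath is in newTagPaths but missing from
-- currentTagPaths (both A and B raise ValueError there), and, in that reachable case,
-- currentTagPaths with duplicate entries, on which A's repeated first-occurrence list.index
-- can jump back to an earlier duplicate or recurse forever (RecursionError) — an accident
-- of re-indexing that no caller of this group-ordering helper would specify.
def Pre_getFinalDropBeforeTagPath (dropBeforeTagPath : String) (newTagPaths : List String) (currentTagPaths : List String) : Prop :=
  dropBeforeTagPath ∈ newTagPaths → (dropBeforeTagPath ∈ currentTagPaths ∧ currentTagPaths.Nodup)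
instance (dropBeforeTagPath : String) (newTagPaths : List String) (currentTagPaths : List String) : Decidable (Pre_getFinalDropBeforeTagPath dropBeforeTagPath newTagPaths currentTagPaths) := by unfold Pre_getFinalDropBeforeTagPath; infer_instance

def pvWitness_getFinalDropBeforeTagPath : String × List String × List String :=
  ("a", ["a", "b"], ["a", "b", "c"])

def Spec_getFinalDropBeforeTagPath (dropBeforeTagPath : String) (newTagPaths : List String) (currentTagPaths : List String) (out : String) : Prop := out = getFinalDropBeforeTagPath_alt dropBeforeTagPath newTagPaths currentTagPaths
instance (dropBeforeTagPath : String) (newTagPaths : List String) (currentTagPaths : List String) (out : String) : Decidable (Spec_getFinalDropBeforeTagPath dropBeforeTagPath newTagPaths currentTagPaths out) := by unfold Spec_getFinalDropBeforeTagPath; infer_instance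

-- ===== CLAIM (what is proved, stated in full; the proofs are below) =====
def Claim_equal_getFinalDropBeforeTagPath : Prop := ∀ (dropBeforeTagPath : String) (newTagPaths : List String) (currentTagPaths : List String), Dom_getFinalDropBeforeTagPath dropBeforeTagPath newTagPaths currentTagPaths → Pre_getFinalDropBeforeTagPath dropBeforeTagPath newTagPaths currentTagPaths → Spec_getFinalDropBeforeTagPath dropBeforeTagPath newTagPaths currentTagPaths (getFinalDropBeforeTagPath dropBeforeTagPath newTagPaths currentTagPaths)

-- ===== LEMMAS AND PROOFS =====

-- A returns its argument immediately when it is not in newTagPaths (any positive fuel).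
theorem goA_notmem (fuel : Nat) (dropBeforeTagPath : String) (newTagPaths currentTagPaths : List String)
    (h : dropBeforeTagPath ∉ newTagPaths) (hf : 1 ≤ fuel) :
    goA fuel dropBeforeTagPath newTagPaths currentTagPaths = dropBeforeTagPath := by
  cases fuel with
  | zero => omega
  | succ f => rw [goA]; simp [h]

-- On a duplicate-free list, index? of the k-th element is exactly k.
theorem index?_of_nodup {α : Type} [BEq α] [LawfulBEq α] (xs : List α) (h : xs.Nodup)
    (k : Nat) (hk : k < xs.length) : PySem.List.index? xs xs[k] = some k := by
  induction xs generalizing k with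
  | nil => simp at hk
  | cons x t ih =>
    rcases List.nodup_cons.mp h with ⟨hx, ht⟩
    cases k with
    | zero => simpa using PySem.List.index?_cons_self x t
    | succ k =>
      have hk' : k < t.length := by simpa using hk
      have hne : x ≠ t[k] := fun he => hx (he ▸ List.getElem_mem hk')
      have := PySem.List.index?_cons_of_ne (v := t[k]) (xs := t) hne
      simp only [List.getElem_cons_succ]
      rw [this, ih ht k hk']
      rfl

-- Main invariant: under Nodup, A's fueled recursion starting at position i of
-- currentTagPaths equals B's single scan of the tail after i.
theorem goA_eq_scan (newTagPaths currentTagPaths : List String) (hnd : currentTagPaths.Nodup)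
    (fuel i : Nat) (hi : i < currentTagPaths.length)
    (hfuel : currentTagPaths.length - i ≤ fuel)
    (hmem : currentTagPaths[i] ∈ newTagPaths) :
    goA fuel currentTagPaths[i] newTagPaths currentTagPaths
      = scanB (PySem.Set.ofList newTagPaths) (currentTagPaths.drop (i + 1)) := by
  induction fuel generalizing i with
  | zero => omega
  | succ fuel ih =>
    rw [goA]
    simp only [hmem, not_true_eq_false, if_false,
      index?_of_nodup currentTagPaths hnd i hi]
    by_cases hlt : i + 1 < currentTagPaths.length
    · simp only [hlt, if_true]
      have hget : (PySem.List.pyGet? currentTagPaths ((i + 1 : Nat) : Int)).getD ""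
          = currentTagPaths[i + 1] := by
        rw [PySem.List.pyGet?_natCast, List.getElem?_eq_getElem hlt]
        rfl
      have hdrop : currentTagPaths.drop (i + 1)
          = currentTagPaths[i + 1] :: currentTagPaths.drop (i + 2) := by
        rw [List.drop_eq_getElem_cons hlt]
      rw [hdrop, scanB]
      by_cases hm2 : currentTagPaths[i + 1] ∈ newTagPaths
      · have hc : PySem.Set.contains (PySem.Set.ofList newTagPaths) currentTagPaths[i + 1] = true := by
          simp [PySem.Set.mem_ofList, hm2]
        simp only [hc, not_true_eq_false, if_false]
        rw [hget]
        have := ih (i + 1) hlt (by omega) hm2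
        simpa using this
      · have hc : PySem.Set.contains (PySem.Set.ofList newTagPaths) currentTagPaths[i + 1] = false := by
          simp [PySem.Set.mem_ofList, hm2]
        simp only [hc]
        rw [hget, goA_notmem fuel _ _ _ hm2 (by omega)]
        simp
    · have hnil : currentTagPaths.drop (i + 1) = [] := List.drop_eq_nil_of_le (by omega)
      simp [hlt, hnil, scanB]

-- ===== VERDICT (by name: the statement is the Claim_ definition above) =====
theorem getFinalDropBeforeTagPath_spec : Claim_equal_getFinalDropBeforeTagPath := by
  intro drop new cur _hdom hpre
  unfold Spec_getFinalDropBeforeTagPath getFinalDropBeforeTagPath getFinalDropBeforeTagPath_alt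
  by_cases hm : drop ∈ new
  · obtain ⟨hin, hnd⟩ := hpre hm
    obtain ⟨i, hidx⟩ := Option.isSome_iff_exists.mp ((PySem.List.index?_isSome_iff cur drop).mpr hin)
    obtain ⟨hi, hgi, -⟩ := PySem.List.getElem_of_index?_eq_some hidx
    have hslice : PySem.List.slice cur (some ((i : Int) + 1)) none = cur.drop (i + 1) := by
      have h1 : ((i : Int) + 1) = ((i + 1 : Nat) : Int) := by push_cast; ring
      rw [h1, PySem.List.slice_from_natCast]
    simp only [hm, not_true_eq_false, if_false, hidx, hslice]
    rw [← hgi]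
    exact goA_eq_scan new cur hnd (cur.length + 1) i hi (by omega) (hgi ▸ hm)
  · rw [goA_notmem (cur.length + 1) _ _ _ hm (by omega)]
    rw [if_pos hm]
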